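-- pv_equiv track=rewrite | github.com/adi-iftime/Cursor-training | agents/pr_review_agent/analysis.py | highest_severity
-- ===== SOURCE A (Python) =====
-- from typing import Any
--
-- def highest_severity(issues: list[dict[str, Any]]) -> str | None:
--     order = {"HIGH": 3, "MEDIUM": 2, "LOW": 1}
--     best: str | None = None
--     for i in issues:
--         sev = i.get("severity")
--         if sev not in order:
--             continue
--         if best is None or order[sev] > order[best]:
--             best = sev
--     return best
-- ===== SOURCE B (Python) =====
-- def highest_severity(issues):
--     for level in ("HIGH", "MEDIUM", "LOW"):
--         if any(i.get("severity") == level for i in issues):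
--             return level
--     return None
-- ===== Notes on version B (the rewrite author's own statement) =====
-- stated objective: alternative
-- what changed: B inverts the loop nesting: it walks the severity tiers top-down (HIGH, MEDIUM, LOW) and returns the first tier any issue carries, instead of scanning issues once while tracking the current best via a rank dict.
import Mathlib
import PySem

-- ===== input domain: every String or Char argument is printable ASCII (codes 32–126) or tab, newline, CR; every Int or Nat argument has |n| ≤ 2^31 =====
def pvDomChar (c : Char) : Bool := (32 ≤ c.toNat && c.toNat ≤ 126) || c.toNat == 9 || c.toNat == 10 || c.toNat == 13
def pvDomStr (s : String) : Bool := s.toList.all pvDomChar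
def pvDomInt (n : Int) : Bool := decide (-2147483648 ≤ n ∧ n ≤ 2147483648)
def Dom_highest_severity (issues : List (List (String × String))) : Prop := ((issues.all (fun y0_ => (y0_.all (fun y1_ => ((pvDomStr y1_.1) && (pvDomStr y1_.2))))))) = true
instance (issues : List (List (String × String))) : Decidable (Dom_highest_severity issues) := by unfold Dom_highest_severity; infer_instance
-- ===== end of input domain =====

-- B inverts the loop nesting: it walks severity tiers top-down and returns the first tier present, instead of a best-so-far scan over issues (objective: alternative).

-- shared helper: i.get("severity") on the issue's dict (association list)
def sevOf (i : List (String × String)) : Option String :=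
  (PySem.Dict.mk i).get? "severity"

-- ===== PORT A =====
-- order = {"HIGH": 3, "MEDIUM": 2, "LOW": 1}
def orderA : PySem.Dict String Int :=
  PySem.Dict.ofList [("HIGH", 3), ("MEDIUM", 2), ("LOW", 1)]

-- the body of A's for-loop (sev = i.get("severity"); if sev not in order: continue; …)
def stepA (best : Option String) (i : List (String × String)) : Option String :=
  match sevOf i with
  | none => best      -- None is not in order: continue
  | some sev =>
    if orderA.contains sev then
      match best with
      | none => some sev
      | some b => if orderA.getD sev 0 > orderA.getD b 0 then some sev else best
    else best

def highest_severity (issues : List (List (String × String))) : Option String :=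
  issues.foldl stepA none

-- ===== PORT B =====
-- 'for level in ("HIGH","MEDIUM","LOW"): if any(i.get("severity") == level for i in issues): return level'
def tierScan (levels : List String) (issues : List (List (String × String))) : Option String :=
  match levels with
  | [] => none
  | l :: ls => if issues.any (fun i => sevOf i == some l) then some l else tierScan ls issues

def highest_severity_alt (issues : List (List (String × String))) : Option String :=
  tierScan ["HIGH", "MEDIUM", "LOW"] issues

-- ===== PRECONDITION & SPEC =====
def Spec_highest_severity (issues : List (List (String × String))) (out : Option String) : Prop := out = highest_severity_alt issues
instance (issues : List (List (String × String))) (out : Option String) : Decidable (Spec_highest_severity issues out) := by unfold Spec_highest_severity; infer_instance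

-- ===== CLAIM (what is proved, stated in full; the proofs are below) =====
def Claim_equal_highest_severity : Prop := ∀ (issues : List (List (String × String))), Dom_highest_severity issues → Spec_highest_severity issues (highest_severity issues)

-- ===== LEMMAS AND PROOFS =====

-- the tier an issue contributes: its severity if recognized, else none
def cat (i : List (String × String)) : Option String :=
  if sevOf i = some "HIGH" then some "HIGH"
  else if sevOf i = some "MEDIUM" then some "MEDIUM"
  else if sevOf i = some "LOW" then some "LOW"
  else none

def rk : Option String → Int
  | some "HIGH" => 3
  | some "MEDIUM" => 2
  | some "LOW" => 1
  | _ => 0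

def mx (a b : Option String) : Option String := if rk b > rk a then b else a

-- priority-max of the issues' tiers, the common reference point of both ports
def chain (issues : List (List (String × String))) : Option String :=
  issues.foldr (fun i acc => mx (cat i) acc) none

def Valid (o : Option String) : Prop :=
  o = none ∨ o = some "LOW" ∨ o = some "MEDIUM" ∨ o = some "HIGH"

lemma valid_cat (i : List (String × String)) : Valid (cat i) := by
  unfold cat Valid; split_ifs <;> simp

lemma valid_mx {a b : Option String} (ha : Valid a) (hb : Valid b) : Valid (mx a b) := by
  unfold mx; split_ifs <;> assumption

lemma valid_chain (issues : List (List (String × String))) : Valid (chain issues) := by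
  induction issues with
  | nil => exact Or.inl rfl
  | cons i is ih => exact valid_mx (valid_cat i) ih

lemma mx_none_right (a : Option String) (ha : Valid a) : mx a none = a := by
  rcases ha with h | h | h | h <;> subst h <;> decide

lemma mx_none_left (b : Option String) (hb : Valid b) : mx none b = b := by
  rcases hb with h | h | h | h <;> subst h <;> decide

lemma mx_assoc {a b c : Option String} (ha : Valid a) (hb : Valid b) (hc : Valid c) :
    mx (mx a b) c = mx a (mx b c) := by
  rcases ha with h | h | h | h <;> subst h <;>
    rcases hb with h | h | h | h <;> subst h <;>
      rcases hc with h | h | h | h <;> subst h <;> decide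

-- A's loop body is mx with the issue's tier
lemma step_eq (best : Option String) (hb : Valid best) (i : List (String × String)) :
    stepA best i = mx best (cat i) := by
  rcases h : sevOf i with _ | s
  · simp [stepA, cat, h, mx_none_right best hb]
  · by_cases h1 : s = "HIGH"
    · subst h1
      rcases hb with hb | hb | hb | hb <;> subst hb <;>
        simp [stepA, cat, h, mx, rk, orderA, PySem.Dict.ofList] <;> decide
    · by_cases h2 : s = "MEDIUM"
      · subst h2
        rcases hb with hb | hb | hb | hb <;> subst hb <;>
          simp [stepA, cat, h, mx, rk, orderA, PySem.Dict.ofList] <;> decide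
      · by_cases h3 : s = "LOW"
        · subst h3
          rcases hb with hb | hb | hb | hb <;> subst hb <;>
            simp [stepA, cat, h, mx, rk, orderA, PySem.Dict.ofList] <;> decide
        · have hc : orderA.contains s = false := by
            simp [orderA, PySem.Dict.ofList, PySem.Dict.update, PySem.Dict.contains_insert,
              PySem.Dict.contains_empty, h1, h2, h3]
          simp [stepA, h, hc, cat, h1, h2, h3, mx_none_right best hb]

-- A's fold computes mx of the initial best with the tier chain
lemma foldA_eq (issues : List (List (String × String))) :
    ∀ (best : Option String), Valid best →
      issues.foldl stepA best = mx best (chain issues) := by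
  induction issues with
  | nil => intro best hb; simp [chain, mx_none_right best hb]
  | cons i is ih =>
    intro best hb
    rw [List.foldl_cons, step_eq best hb i, ih _ (valid_mx hb (valid_cat i))]
    show _ = mx best (chain (i :: is))
    have hch : chain (i :: is) = mx (cat i) (chain is) := rfl
    rw [hch, ← mx_assoc hb (valid_cat i) (valid_chain is)]

-- B's tier scan also computes the tier chain
def pres (l : String) (issues : List (List (String × String))) : Bool :=
  issues.any (fun i => sevOf i == some l)

def ifchain (issues : List (List (String × String))) : Option String :=
  if pres "HIGH" issues then some "HIGH"
  else if pres "MEDIUM" issues then some "MEDIUM"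
  else if pres "LOW" issues then some "LOW"
  else none

lemma valid_ifchain (issues : List (List (String × String))) : Valid (ifchain issues) := by
  unfold ifchain Valid; split_ifs <;> simp

lemma chain_ifchain (issues : List (List (String × String))) : chain issues = ifchain issues := by
  induction issues with
  | nil => decide
  | cons i is ih =>
    have hch : chain (i :: is) = mx (cat i) (chain is) := rfl
    have pc : ∀ l, pres l (i :: is) = ((sevOf i == some l) || pres l is) := fun l => by
      simp [pres]
    rw [hch, ih]
    rcases h : sevOf i with _ | s
    · have hc : cat i = none := by simp [cat, h]
      rw [hc, mx_none_left _ (valid_ifchain is)]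
      simp [ifchain, pc, h]
    · by_cases h1 : s = "HIGH"
      · subst h1
        have hc : cat i = some "HIGH" := by simp [cat, h]
        rw [hc]
        simp only [ifchain, pc, h]
        cases hH : pres "HIGH" is <;> cases hM : pres "MEDIUM" is <;> cases hL : pres "LOW" is <;>
          simp [mx, rk]
      · by_cases h2 : s = "MEDIUM"
        · subst h2
          have hc : cat i = some "MEDIUM" := by simp [cat, h]
          rw [hc]
          simp only [ifchain, pc, h]
          cases hH : pres "HIGH" is <;> cases hM : pres "MEDIUM" is <;> cases hL : pres "LOW" is <;>
            simp [mx, rk]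
        · by_cases h3 : s = "LOW"
          · subst h3
            have hc : cat i = some "LOW" := by simp [cat, h]
            rw [hc]
            simp only [ifchain, pc, h]
            cases hH : pres "HIGH" is <;> cases hM : pres "MEDIUM" is <;> cases hL : pres "LOW" is <;>
              simp [mx, rk]
          · have hc : cat i = none := by simp [cat, h, h1, h2, h3]
            rw [hc, mx_none_left _ (valid_ifchain is)]
            simp [ifchain, pc, h, h1, h2, h3]

lemma alt_eq_ifchain (issues : List (List (String × String))) :
    highest_severity_alt issues = ifchain issues := by
  simp only [highest_severity_alt, tierScan, ifchain, pres]
  split_ifs <;> rfl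

lemma main (issues : List (List (String × String))) :
    highest_severity issues = highest_severity_alt issues := by
  rw [highest_severity, foldA_eq issues none (Or.inl rfl),
    mx_none_left _ (valid_chain issues), chain_ifchain, ← alt_eq_ifchain]

-- ===== VERDICT (by name: the statement is the Claim_ definition above) =====
theorem highest_severity_spec : Claim_equal_highest_severity := by
  intro issues _
  unfold Spec_highest_severity
  exact main issues
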